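-- pv_equiv track=rewrite | github.com/bwicky/SAPP_DMX | DMX/wetlab_util_jq.py | generate_well_names
-- ===== SOURCE A (Python) =====
-- def generate_well_names(plate_name):
--     '''
--     Function to generate well names (e.g., A1, A2,  B2, etc.) for 6, 96, 384, or 1536 well plates.
--
--     plate_name: string, the name of the plate (e.g., "6w_plate" "96w_plate", "384w_plate", "1536w_plate")
--     Returns a list of well
--     '''
--     # List of row names for the plates
--     row_name_list = ["A", "B", "C", "D", "E", "F", "G", "H",
--                      "I", "J", "K", "L", "M", "N", "O", "P",
--                      "Q", "R", "S", "T", "U", "V", "W", "X",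
--                      "Y", "Z","AA","AB","AC","AD","AE","AF"]
--
--     # 6 well plate. column: 3. row: 2
--     # 96 well plate. columns: 12. rows: 8
--     # 384 well plate. columns: 24. rows: 16
--     # 1536 well plate. columns: 48. rows: 32
--
--     if plate_name == '6w_plate':
--         return [f"{row_name_list[row]}{col + 1}" for row in range(2) for col in range(3)]
--     elif plate_name == "96w_plate":
--         return [f"{row_name_list[row]}{col + 1}" for row in range(8) for col in range(12)] # It's "c+1" because python starts indexing at 0 and plates starts at 1.
--     elif plate_name == "384w_plate":
--         return [f"{row_name_list[row]}{col + 1}" for row in range(16) for col in range(24)]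
--     elif plate_name == "1536w_plate":
--         return [f"{row_name_list[row]}{col + 1}" for row in range(32) for col in range(48)]
--     else:
--         print ("Invalid plate name. Please enter 6w_plate, 96w_plate, 384w_plate, or 1536w_plate.")
-- ===== SOURCE B (Python) =====
-- ROW_NAMES = ["A", "B", "C", "D", "E", "F", "G", "H",
--              "I", "J", "K", "L", "M", "N", "O", "P",
--              "Q", "R", "S", "T", "U", "V", "W", "X",
--              "Y", "Z", "AA", "AB", "AC", "AD", "AE", "AF"]
--
-- PLATE_DIMS = {'6w_plate': (2, 3), '96w_plate': (8, 12),
--               '384w_plate': (16, 24), '1536w_plate': (32, 48)}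
--
--
-- def generate_well_names(plate_name):
--     dims = PLATE_DIMS.get(plate_name)
--     if dims is None:
--         print("Invalid plate name. Please enter 6w_plate, 96w_plate, 384w_plate, or 1536w_plate.")
--         return None
--     rows, cols = dims
--     return [f"{ROW_NAMES[i // cols]}{i % cols + 1}" for i in range(rows * cols)]
-- ===== Notes on version B (the rewrite author's own statement) =====
-- stated objective: simpler
-- what changed: Replaces the four branch-specific nested comprehensions with one dict lookup of (rows, cols) and a single flat loop over range(rows*cols) using divmod-style index decomposition.
import Mathlib
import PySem

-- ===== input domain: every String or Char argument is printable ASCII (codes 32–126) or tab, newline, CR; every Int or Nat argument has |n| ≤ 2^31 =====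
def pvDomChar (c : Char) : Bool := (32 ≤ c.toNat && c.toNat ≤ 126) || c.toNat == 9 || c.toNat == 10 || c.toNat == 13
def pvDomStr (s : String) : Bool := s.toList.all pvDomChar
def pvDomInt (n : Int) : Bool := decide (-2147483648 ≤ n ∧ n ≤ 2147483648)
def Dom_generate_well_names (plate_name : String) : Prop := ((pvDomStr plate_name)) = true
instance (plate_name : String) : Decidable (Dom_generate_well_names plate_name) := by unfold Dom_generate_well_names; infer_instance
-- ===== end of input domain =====

-- B replaces A's four branch-specific nested comprehensions with a dict of (rows, cols)
-- and one flat divmod loop; objective: simpler. Equivalence is about the return value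
-- only (the invalid-name print is a side effect in both).

-- ===== PORT A =====
def rowNameListA : List String :=
  ["A", "B", "C", "D", "E", "F", "G", "H",
   "I", "J", "K", "L", "M", "N", "O", "P",
   "Q", "R", "S", "T", "U", "V", "W", "X",
   "Y", "Z", "AA", "AB", "AC", "AD", "AE", "AF"]

-- row_name_list[row] is always in range (row < 32 in every branch), so pyGet?.getD "" is exact
def generate_well_names (plate_name : String) : Option (List String) :=
  if plate_name == "6w_plate" then
    some ((PySem.List.pyRange 0 2 1).flatMap (fun row =>
      (PySem.List.pyRange 0 3 1).map (fun col =>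
        ((PySem.List.pyGet? rowNameListA row).getD "") ++ PySem.Int.toStr (col + 1))))
  else if plate_name == "96w_plate" then
    some ((PySem.List.pyRange 0 8 1).flatMap (fun row =>
      (PySem.List.pyRange 0 12 1).map (fun col =>
        ((PySem.List.pyGet? rowNameListA row).getD "") ++ PySem.Int.toStr (col + 1))))
  else if plate_name == "384w_plate" then
    some ((PySem.List.pyRange 0 16 1).flatMap (fun row =>
      (PySem.List.pyRange 0 24 1).map (fun col =>
        ((PySem.List.pyGet? rowNameListA row).getD "") ++ PySem.Int.toStr (col + 1))))
  else if plate_name == "1536w_plate" then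
    some ((PySem.List.pyRange 0 32 1).flatMap (fun row =>
      (PySem.List.pyRange 0 48 1).map (fun col =>
        ((PySem.List.pyGet? rowNameListA row).getD "") ++ PySem.Int.toStr (col + 1))))
  else
    none

-- ===== PORT B =====
def rowNamesB : List String :=
  ["A", "B", "C", "D", "E", "F", "G", "H",
   "I", "J", "K", "L", "M", "N", "O", "P",
   "Q", "R", "S", "T", "U", "V", "W", "X",
   "Y", "Z", "AA", "AB", "AC", "AD", "AE", "AF"]

def plateDims : PySem.Dict String (Int × Int) :=
  PySem.Dict.ofList [("6w_plate", (2, 3)), ("96w_plate", (8, 12)),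
                     ("384w_plate", (16, 24)), ("1536w_plate", (32, 48))]

-- ROW_NAMES[i // cols] is always in range, so pyGet?.getD "" is exact
def generate_well_names_alt (plate_name : String) : Option (List String) :=
  match plateDims.get? plate_name with
  | none => none
  | some (rows, cols) =>
    some ((PySem.List.pyRange 0 (rows * cols) 1).map (fun i =>
      ((PySem.List.pyGet? rowNamesB (PySem.Int.floordiv i cols)).getD "")
        ++ PySem.Int.toStr (PySem.Int.mod i cols + 1)))

-- ===== PRECONDITION & SPEC =====
def Spec_generate_well_names (plate_name : String) (out : Option (List String)) : Prop := out = generate_well_names_alt plate_name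
instance (plate_name : String) (out : Option (List String)) : Decidable (Spec_generate_well_names plate_name out) := by unfold Spec_generate_well_names; infer_instance

-- ===== CLAIM (what is proved, stated in full; the proofs are below) =====
def Claim_equal_generate_well_names : Prop := ∀ (plate_name : String), Dom_generate_well_names plate_name → Spec_generate_well_names plate_name (generate_well_names plate_name)

-- ===== LEMMAS AND PROOFS =====

set_option maxRecDepth 40000 in
-- ===== VERDICT (by name: the statement is the Claim_ definition above) =====
theorem generate_well_names_spec : Claim_equal_generate_well_names := by
  intro p _
  unfold Spec_generate_well_names
  by_cases h1 : p = "6w_plate"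
  · subst h1; decide
  by_cases h2 : p = "96w_plate"
  · subst h2; decide
  by_cases h3 : p = "384w_plate"
  · subst h3; decide
  by_cases h4 : p = "1536w_plate"
  · subst h4; decide
  have e1 : ("6w_plate" == p) = false := beq_false_of_ne (Ne.symm h1)
  have e2 : ("96w_plate" == p) = false := beq_false_of_ne (Ne.symm h2)
  have e3 : ("384w_plate" == p) = false := beq_false_of_ne (Ne.symm h3)
  have e4 : ("1536w_plate" == p) = false := beq_false_of_ne (Ne.symm h4)
  have hd : plateDims.get? p = none := by
    simp [plateDims, PySem.Dict.ofList, PySem.Dict.empty, PySem.Dict.update,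
          PySem.Dict.get?, PySem.Dict.insert, PySem.Dict.contains,
          e1, e2, e3, e4]
  simp [generate_well_names, generate_well_names_alt, hd, h1, h2, h3, h4]
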